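-- pv_equiv track=rewrite | github.com/NoofAbu/hackathonchatbot | bot_logic.py | get_concourse
-- ===== SOURCE A (Python) =====
-- def get_concourse(visioIDs):
--     locations = []
--     for visioId in visioIDs:
--         if visioId.startswith("B01-UL001-IDA") or visioId.startswith("B01-UL002-IDA"):
--             locations.append("A concourse")
--         if visioId.startswith("B01-UL001-IDB") or visioId.startswith("B01-UL002-IDB"):
--             locations.append("B concourse")
--         if visioId.startswith("B01-UL001-IDC") or visioId.startswith("B01-UL002-IDC"):
--             locations.append("C concourse")
--         if visioId.startswith("B01-UL001-IDD") or visioId.startswith("B01-UL002-IDD"):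
--             locations.append("D concourse")
--         if visioId.startswith("B01-UL001-IDE") or visioId.startswith("B01-UL002-IDE"):
--             locations.append("E concourse")
--         if visioId.startswith("B01-UL001-IDL") or visioId.startswith("B01-UL002-IDL"):
--             locations.append("Landside")
--         if visioId.startswith("B01-UL000"):
--             locations.append("Ground Floor")
--         if visioId.startswith("B01-UL001"):
--             locations.append("1st Floor")
--         if visioId.startswith("B01-UL002"):
--             locations.append("2nd Floor")
--     return locations
-- ===== SOURCE B (Python) =====
-- _CONC = {"-IDA": "A concourse", "-IDB": "B concourse", "-IDC": "C concourse",
--          "-IDD": "D concourse", "-IDE": "E concourse", "-IDL": "Landside"}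
-- _FLOOR = {"0": "Ground Floor", "1": "1st Floor", "2": "2nd Floor"}
--
-- def get_concourse(visioIDs):
--     locations = []
--     for s in visioIDs:
--         if not s.startswith("B01-UL00") or len(s) <= 8:
--             continue
--         d = s[8]
--         if d in ("1", "2"):
--             lab = _CONC.get(s[9:13])
--             if lab is not None:
--                 locations.append(lab)
--         lab = _FLOOR.get(d)
--         if lab is not None:
--             locations.append(lab)
--     return locations
-- ===== Notes on version B (the rewrite author's own statement) =====
-- stated objective: faster
-- what changed: B parses each id instead of running nine startswith scans: it checks the shared stem 'B01-UL00' once, then dispatches on the floor digit s[8] and, for floors 1/2, on the four-character slice s[9:13] through two small lookup dicts.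
import Mathlib
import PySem

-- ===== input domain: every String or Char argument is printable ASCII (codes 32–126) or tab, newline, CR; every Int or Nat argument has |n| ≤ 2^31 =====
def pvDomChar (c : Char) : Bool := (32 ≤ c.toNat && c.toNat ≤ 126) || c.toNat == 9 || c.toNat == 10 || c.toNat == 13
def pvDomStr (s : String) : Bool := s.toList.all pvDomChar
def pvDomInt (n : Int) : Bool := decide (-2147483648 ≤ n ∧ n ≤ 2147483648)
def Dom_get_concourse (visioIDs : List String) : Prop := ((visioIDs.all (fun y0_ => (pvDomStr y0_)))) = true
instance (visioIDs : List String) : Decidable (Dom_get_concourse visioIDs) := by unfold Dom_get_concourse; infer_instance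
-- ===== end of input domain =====

-- B parses each id instead of testing nine fixed prefixes: it strips the shared
-- "B01-UL00" stem once, dispatches on the floor digit s[8] and on the slice s[9:13]
-- through two small dicts (objective: faster by a constant factor, measured).

-- ===== PORT A =====
def get_concourse (visioIDs : List String) : List String :=
  visioIDs.foldl (fun locations visioId =>
    let l1 := if PySem.Str.startswith visioId "B01-UL001-IDA" || PySem.Str.startswith visioId "B01-UL002-IDA" then locations ++ ["A concourse"] else locations
    let l2 := if PySem.Str.startswith visioId "B01-UL001-IDB" || PySem.Str.startswith visioId "B01-UL002-IDB" then l1 ++ ["B concourse"] else l1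
    let l3 := if PySem.Str.startswith visioId "B01-UL001-IDC" || PySem.Str.startswith visioId "B01-UL002-IDC" then l2 ++ ["C concourse"] else l2
    let l4 := if PySem.Str.startswith visioId "B01-UL001-IDD" || PySem.Str.startswith visioId "B01-UL002-IDD" then l3 ++ ["D concourse"] else l3
    let l5 := if PySem.Str.startswith visioId "B01-UL001-IDE" || PySem.Str.startswith visioId "B01-UL002-IDE" then l4 ++ ["E concourse"] else l4
    let l6 := if PySem.Str.startswith visioId "B01-UL001-IDL" || PySem.Str.startswith visioId "B01-UL002-IDL" then l5 ++ ["Landside"] else l5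
    let l7 := if PySem.Str.startswith visioId "B01-UL000" then l6 ++ ["Ground Floor"] else l6
    let l8 := if PySem.Str.startswith visioId "B01-UL001" then l7 ++ ["1st Floor"] else l7
    let l9 := if PySem.Str.startswith visioId "B01-UL002" then l8 ++ ["2nd Floor"] else l8
    l9) []

-- ===== PORT B =====
-- Python's one-character strings s[8] / the _FLOOR keys are ported as Char (exact:
-- both sides compare single code points).
def pvConc : PySem.Dict String String :=
  PySem.Dict.ofList
    [("-IDA", "A concourse"), ("-IDB", "B concourse"), ("-IDC", "C concourse"),
     ("-IDD", "D concourse"), ("-IDE", "E concourse"), ("-IDL", "Landside")]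

def pvFloor : PySem.Dict Char String :=
  PySem.Dict.ofList [('0', "Ground Floor"), ('1', "1st Floor"), ('2', "2nd Floor")]

def get_concourse_alt (visioIDs : List String) : List String :=
  visioIDs.foldl (fun locations s =>
    if ¬ PySem.Str.startswith s "B01-UL00" ∨ PySem.Str.len s ≤ 8 then locations  -- continue
    else
      match PySem.Str.pyGet? s 8 with
      | none => locations  -- unreachable: len s > 8
      | some d =>
        let locations :=
          if d == '1' || d == '2' then
            match pvConc.get? (PySem.Str.slice s (some 9) (some 13)) with
            | some lab => locations ++ [lab]
            | none => locations
          else locations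
        match pvFloor.get? d with
        | some lab => locations ++ [lab]
        | none => locations) []

-- ===== PRECONDITION & SPEC =====
def Spec_get_concourse (visioIDs : List String) (out : List String) : Prop := out = get_concourse_alt visioIDs
instance (visioIDs : List String) (out : List String) : Decidable (Spec_get_concourse visioIDs out) := by unfold Spec_get_concourse; infer_instance

-- ===== CLAIM (what is proved, stated in full; the proofs are below) =====
def Claim_equal_get_concourse : Prop := ∀ (visioIDs : List String), Dom_get_concourse visioIDs → Spec_get_concourse visioIDs (get_concourse visioIDs)

-- ===== LEMMAS AND PROOFS =====

-- what A's loop body appends for one id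
def pvA (v : String) : List String :=
  (if PySem.Str.startswith v "B01-UL001-IDA" || PySem.Str.startswith v "B01-UL002-IDA" then ["A concourse"] else []) ++
  (if PySem.Str.startswith v "B01-UL001-IDB" || PySem.Str.startswith v "B01-UL002-IDB" then ["B concourse"] else []) ++
  (if PySem.Str.startswith v "B01-UL001-IDC" || PySem.Str.startswith v "B01-UL002-IDC" then ["C concourse"] else []) ++
  (if PySem.Str.startswith v "B01-UL001-IDD" || PySem.Str.startswith v "B01-UL002-IDD" then ["D concourse"] else []) ++
  (if PySem.Str.startswith v "B01-UL001-IDE" || PySem.Str.startswith v "B01-UL002-IDE" then ["E concourse"] else []) ++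
  (if PySem.Str.startswith v "B01-UL001-IDL" || PySem.Str.startswith v "B01-UL002-IDL" then ["Landside"] else []) ++
  (if PySem.Str.startswith v "B01-UL000" then ["Ground Floor"] else []) ++
  (if PySem.Str.startswith v "B01-UL001" then ["1st Floor"] else []) ++
  (if PySem.Str.startswith v "B01-UL002" then ["2nd Floor"] else [])

-- what B's loop body appends for one id
def pvB (s : String) : List String :=
  if ¬ PySem.Str.startswith s "B01-UL00" ∨ PySem.Str.len s ≤ 8 then []
  else
    match PySem.Str.pyGet? s 8 with
    | none => []
    | some d =>
      (if d == '1' || d == '2' then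
        match pvConc.get? (PySem.Str.slice s (some 9) (some 13)) with
        | some lab => [lab]
        | none => []
      else []) ++
      (match pvFloor.get? d with
       | some lab => [lab]
       | none => [])

theorem pv_ifapp {α : Type} (b : Bool) (x : α) (l : List α) :
    (if b then l ++ [x] else l) = l ++ (if b then [x] else []) := by
  cases b <;> simp

theorem pvA_body (acc : List String) (v : String) :
    (let l1 := if PySem.Str.startswith v "B01-UL001-IDA" || PySem.Str.startswith v "B01-UL002-IDA" then acc ++ ["A concourse"] else acc
     let l2 := if PySem.Str.startswith v "B01-UL001-IDB" || PySem.Str.startswith v "B01-UL002-IDB" then l1 ++ ["B concourse"] else l1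
     let l3 := if PySem.Str.startswith v "B01-UL001-IDC" || PySem.Str.startswith v "B01-UL002-IDC" then l2 ++ ["C concourse"] else l2
     let l4 := if PySem.Str.startswith v "B01-UL001-IDD" || PySem.Str.startswith v "B01-UL002-IDD" then l3 ++ ["D concourse"] else l3
     let l5 := if PySem.Str.startswith v "B01-UL001-IDE" || PySem.Str.startswith v "B01-UL002-IDE" then l4 ++ ["E concourse"] else l4
     let l6 := if PySem.Str.startswith v "B01-UL001-IDL" || PySem.Str.startswith v "B01-UL002-IDL" then l5 ++ ["Landside"] else l5
     let l7 := if PySem.Str.startswith v "B01-UL000" then l6 ++ ["Ground Floor"] else l6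
     let l8 := if PySem.Str.startswith v "B01-UL001" then l7 ++ ["1st Floor"] else l7
     let l9 := if PySem.Str.startswith v "B01-UL002" then l8 ++ ["2nd Floor"] else l8
     l9)
    = acc ++ pvA v := by
  unfold pvA
  simp only [pv_ifapp]
  simp only [List.append_assoc]

theorem pvB_body (acc : List String) (s : String) :
    (if ¬ PySem.Str.startswith s "B01-UL00" ∨ PySem.Str.len s ≤ 8 then acc
     else
       match PySem.Str.pyGet? s 8 with
       | none => acc
       | some d =>
         let acc' :=
           if d == '1' || d == '2' then
             match pvConc.get? (PySem.Str.slice s (some 9) (some 13)) with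
             | some lab => acc ++ [lab]
             | none => acc
           else acc
         match pvFloor.get? d with
         | some lab => acc' ++ [lab]
         | none => acc')
    = acc ++ pvB s := by
  unfold pvB
  split_ifs with h
  · simp
  · cases hg : PySem.Str.pyGet? s 8 with
    | none => simp
    | some d =>
      simp only []
      split_ifs with hd
      · cases hc : pvConc.get? (PySem.Str.slice s (some 9) (some 13)) <;>
          cases hf : pvFloor.get? d <;> simp
      · cases hf : pvFloor.get? d <;> simp

-- a string not starting with the stem "B01-UL00" passes none of A's nine tests
theorem pv_not_stem (s p : String) (hp : ("B01-UL00".toList) <+: p.toList)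
    (h : ¬ PySem.Str.startswith s "B01-UL00" = true) :
    PySem.Str.startswith s p = false := by
  rw [Bool.eq_false_iff]
  intro hps
  apply h
  rw [PySem.Str.startswith_eq, PySem.Chars.startswith_iff] at *
  exact hp.trans hps

-- a startswith test on a string with stem "B01-UL00" reads only the remainder r
theorem pv_stem_b (s p : String) (r tail : List Char)
    (hr : s.toList = "B01-UL00".toList ++ r)
    (hp : p.toList = "B01-UL00".toList ++ tail) :
    PySem.Str.startswith s p = decide (tail <+: r) := by
  have hiff : PySem.Str.startswith s p = true ↔ tail <+: r := by
    rw [PySem.Str.startswith_eq, PySem.Chars.startswith_iff, hr, hp,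
        List.prefix_append_right_inj]
  by_cases hx : tail <+: r
  · simpa [hx] using hiff.mpr hx
  · simp [hx]
    rw [Bool.eq_false_iff]
    exact fun hy => hx (hiff.mp hy)

theorem pv_slice_9_13 (r : List Char) (s : String)
    (hr : s.toList = "B01-UL00".toList ++ r) :
    (PySem.Str.slice s (some 9) (some 13)).toList = (r.drop 1).take 4 := by
  have h9 : (9 : Int) = ((9 : Nat) : Int) := by norm_num
  have h13 : (13 : Int) = ((13 : Nat) : Int) := by norm_num
  rw [PySem.Str.toList_slice, PySem.Chars.slice_eq_listSlice, h9, h13,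
      PySem.List.slice_natCast, hr]
  have hd : List.drop 9 ("B01-UL00".toList ++ r) = r.drop 1 := by
    rw [List.drop_append]; simp
  rw [hd]

-- two distinct prefixes of equal length can never both be prefixes of the same list
theorem pv_excl (p q v : List Char) (hlen : p.length = q.length) (hne : p ≠ q)
    (hp : p <+: v) (hq : q <+: v) : False := by
  rcases List.prefix_or_prefix_of_prefix hp hq with h | h
  · exact hne (h.eq_of_length hlen)
  · exact hne ((h.eq_of_length hlen.symm).symm)

-- the six-way concourse dispatch on s[9:13] agrees with the six prefix tests
theorem pv_conc_chain (t : List Char) (key : String) (hkey : key.toList = t.take 4) :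
    (match pvConc.get? key with | some lab => [lab] | none => ([] : List String))
    = ((if "-IDA".toList <+: t then ["A concourse"] else []) ++
       (if "-IDB".toList <+: t then ["B concourse"] else []) ++
       (if "-IDC".toList <+: t then ["C concourse"] else []) ++
       (if "-IDD".toList <+: t then ["D concourse"] else []) ++
       (if "-IDE".toList <+: t then ["E concourse"] else []) ++
       (if "-IDL".toList <+: t then ["Landside"] else [])) := by
  have hb : ∀ (L : String), L.toList.length = 4 →
      ((L == key) = decide (L.toList <+: t)) := by
    intro L hL
    have : (L = key) ↔ (L.toList <+: t) := by
      rw [← String.toList_inj, hkey, List.prefix_iff_eq_take, hL]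
    exact decide_eq_decide.mpr this
  have hconc : pvConc = PySem.Dict.mk
      [("-IDA", "A concourse"), ("-IDB", "B concourse"), ("-IDC", "C concourse"),
       ("-IDD", "D concourse"), ("-IDE", "E concourse"), ("-IDL", "Landside")] := by rfl
  rw [hconc]
  simp only [PySem.Dict.get?_mk_cons,
    hb "-IDA" (by decide), hb "-IDB" (by decide), hb "-IDC" (by decide),
    hb "-IDD" (by decide), hb "-IDE" (by decide), hb "-IDL" (by decide)]
  by_cases pA : "-IDA".toList <+: t
  · have qB : ¬ "-IDB".toList <+: t := fun hq => pv_excl _ _ t (by decide) (by decide) pA hq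
    have qC : ¬ "-IDC".toList <+: t := fun hq => pv_excl _ _ t (by decide) (by decide) pA hq
    have qD : ¬ "-IDD".toList <+: t := fun hq => pv_excl _ _ t (by decide) (by decide) pA hq
    have qE : ¬ "-IDE".toList <+: t := fun hq => pv_excl _ _ t (by decide) (by decide) pA hq
    have qL : ¬ "-IDL".toList <+: t := fun hq => pv_excl _ _ t (by decide) (by decide) pA hq
    simp only [pA, qB, qC, qD, qE, qL]; simp

  · by_cases pB : "-IDB".toList <+: t
    · have qC : ¬ "-IDC".toList <+: t := fun hq => pv_excl _ _ t (by decide) (by decide) pB hq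
      have qD : ¬ "-IDD".toList <+: t := fun hq => pv_excl _ _ t (by decide) (by decide) pB hq
      have qE : ¬ "-IDE".toList <+: t := fun hq => pv_excl _ _ t (by decide) (by decide) pB hq
      have qL : ¬ "-IDL".toList <+: t := fun hq => pv_excl _ _ t (by decide) (by decide) pB hq
      simp only [pA, pB, qC, qD, qE, qL]; simp

    · by_cases pC : "-IDC".toList <+: t
      · have qD : ¬ "-IDD".toList <+: t := fun hq => pv_excl _ _ t (by decide) (by decide) pC hq
        have qE : ¬ "-IDE".toList <+: t := fun hq => pv_excl _ _ t (by decide) (by decide) pC hq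
        have qL : ¬ "-IDL".toList <+: t := fun hq => pv_excl _ _ t (by decide) (by decide) pC hq
        simp only [pA, pB, pC, qD, qE, qL]; simp

      · by_cases pD : "-IDD".toList <+: t
        · have qE : ¬ "-IDE".toList <+: t := fun hq => pv_excl _ _ t (by decide) (by decide) pD hq
          have qL : ¬ "-IDL".toList <+: t := fun hq => pv_excl _ _ t (by decide) (by decide) pD hq
          simp only [pA, pB, pC, pD, qE, qL]; simp

        · by_cases pE : "-IDE".toList <+: t
          · have qL : ¬ "-IDL".toList <+: t := fun hq => pv_excl _ _ t (by decide) (by decide) pE hq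
            simp only [pA, pB, pC, pD, pE, qL]; simp

          · by_cases pL : "-IDL".toList <+: t
            · simp only [pA, pB, pC, pD, pE, pL]; simp

            · simp only [pA, pB, pC, pD, pE, pL]; simp [PySem.Dict.get?]


-- per-id agreement of the two loop bodies
theorem pv_add_eq (s : String) : pvA s = pvB s := by
  by_cases h : PySem.Str.startswith s "B01-UL00" = true
  · -- the id carries the stem: split off the remainder r
    have hpre : "B01-UL00".toList <+: s.toList := by
      rw [PySem.Str.startswith_eq, PySem.Chars.startswith_iff] at h; exact h
    obtain ⟨r, hr⟩ := hpre
    have hr' : s.toList = "B01-UL00".toList ++ r := hr.symm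
    have e1 := pv_stem_b s "B01-UL001-IDA" r "1-IDA".toList hr' (by decide)
    have e2 := pv_stem_b s "B01-UL002-IDA" r "2-IDA".toList hr' (by decide)
    have e3 := pv_stem_b s "B01-UL001-IDB" r "1-IDB".toList hr' (by decide)
    have e4 := pv_stem_b s "B01-UL002-IDB" r "2-IDB".toList hr' (by decide)
    have e5 := pv_stem_b s "B01-UL001-IDC" r "1-IDC".toList hr' (by decide)
    have e6 := pv_stem_b s "B01-UL002-IDC" r "2-IDC".toList hr' (by decide)
    have e7 := pv_stem_b s "B01-UL001-IDD" r "1-IDD".toList hr' (by decide)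
    have e8 := pv_stem_b s "B01-UL002-IDD" r "2-IDD".toList hr' (by decide)
    have e9 := pv_stem_b s "B01-UL001-IDE" r "1-IDE".toList hr' (by decide)
    have e10 := pv_stem_b s "B01-UL002-IDE" r "2-IDE".toList hr' (by decide)
    have e11 := pv_stem_b s "B01-UL001-IDL" r "1-IDL".toList hr' (by decide)
    have e12 := pv_stem_b s "B01-UL002-IDL" r "2-IDL".toList hr' (by decide)
    have e13 := pv_stem_b s "B01-UL000" r "0".toList hr' (by decide)
    have e14 := pv_stem_b s "B01-UL001" r "1".toList hr' (by decide)
    have e15 := pv_stem_b s "B01-UL002" r "2".toList hr' (by decide)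
    have hlen : PySem.Str.len s = 8 + (r.length : Int) := by
      have h8 : ("B01-UL00".toList).length = 8 := by decide
      rw [PySem.Str.len_eq, hr', List.length_append, h8]
      push_cast
      ring
    cases r with
    | nil =>
      have hB : pvB s = [] := by
        unfold pvB
        rw [if_pos (Or.inr (by rw [hlen]; norm_num))]
      rw [hB]
      simp only [pvA, e1, e2, e3, e4, e5, e6, e7, e8, e9, e10, e11, e12, e13, e14, e15]
      decide
    | cons d t =>
      have hnotle : ¬ PySem.Str.len s ≤ 8 := by
        rw [hlen]; simp
      have hget : PySem.Str.pyGet? s 8 = some d := by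
        rw [show (8 : Int) = ((8 : Nat) : Int) from by norm_num,
            PySem.Str.pyGet?_natCast, hr']
        rfl
      have hkey := pv_slice_9_13 (d :: t) s hr'
      simp only [List.drop_succ_cons, List.drop_zero] at hkey
      have hBv : pvB s
          = (if d == '1' || d == '2' then
              (match pvConc.get? (PySem.Str.slice s (some 9) (some 13)) with
               | some lab => [lab] | none => []) else []) ++
            (match pvFloor.get? d with | some lab => [lab] | none => []) := by
        unfold pvB
        rw [if_neg (fun hc => hc.elim (fun hx => hx h) hnotle), hget]
      rw [hBv]
      have hfl1 : pvFloor.get? '1' = some "1st Floor" := by decide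
      have hfl2 : pvFloor.get? '2' = some "2nd Floor" := by decide
      have hfl0 : pvFloor.get? '0' = some "Ground Floor" := by decide
      by_cases hd1 : d = '1'
      · subst hd1
        rw [pv_conc_chain t _ hkey]
        simp only [pvA, e1, e2, e3, e4, e5, e6, e7, e8, e9, e10, e11, e12, e13, e14, e15]
        simp [List.cons_prefix_cons, hfl1]
        split_ifs <;> rfl
      · by_cases hd2 : d = '2'
        · subst hd2
          rw [pv_conc_chain t _ hkey]
          simp only [pvA, e1, e2, e3, e4, e5, e6, e7, e8, e9, e10, e11, e12, e13, e14, e15]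
          simp [List.cons_prefix_cons, hfl2]
          split_ifs <;> rfl
        · by_cases hd0 : d = '0'
          · subst hd0
            simp only [pvA, e1, e2, e3, e4, e5, e6, e7, e8, e9, e10, e11, e12, e13, e14, e15]
            simp [List.cons_prefix_cons, hfl0]
          · have f0 : ('0' == d) = false := beq_eq_false_iff_ne.mpr (Ne.symm hd0)
            have f1 : ('1' == d) = false := beq_eq_false_iff_ne.mpr (Ne.symm hd1)
            have f2 : ('2' == d) = false := beq_eq_false_iff_ne.mpr (Ne.symm hd2)
            have g1 : (d == '1') = false := beq_eq_false_iff_ne.mpr hd1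
            have g2 : (d == '2') = false := beq_eq_false_iff_ne.mpr hd2
            have hf : pvFloor.get? d = none := by
              rw [show pvFloor = PySem.Dict.mk
                    [('0', "Ground Floor"), ('1', "1st Floor"), ('2', "2nd Floor")] from rfl]
              simp [PySem.Dict.get?_mk_cons, f0, f1, f2, PySem.Dict.get?]
            simp only [pvA, e1, e2, e3, e4, e5, e6, e7, e8, e9, e10, e11, e12, e13, e14, e15]
            simp [List.cons_prefix_cons, hf, g1, g2, Ne.symm hd0, Ne.symm hd1, Ne.symm hd2]
  · -- no stem: every test fails, B skips
    have hB : pvB s = [] := by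
      unfold pvB
      rw [if_pos (Or.inl h)]
    have h1 := pv_not_stem s "B01-UL001-IDA" (by decide) h
    have h2 := pv_not_stem s "B01-UL002-IDA" (by decide) h
    have h3 := pv_not_stem s "B01-UL001-IDB" (by decide) h
    have h4 := pv_not_stem s "B01-UL002-IDB" (by decide) h
    have h5 := pv_not_stem s "B01-UL001-IDC" (by decide) h
    have h6 := pv_not_stem s "B01-UL002-IDC" (by decide) h
    have h7 := pv_not_stem s "B01-UL001-IDD" (by decide) h
    have h8 := pv_not_stem s "B01-UL002-IDD" (by decide) h
    have h9 := pv_not_stem s "B01-UL001-IDE" (by decide) h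
    have h10 := pv_not_stem s "B01-UL002-IDE" (by decide) h
    have h11 := pv_not_stem s "B01-UL001-IDL" (by decide) h
    have h12 := pv_not_stem s "B01-UL002-IDL" (by decide) h
    have h13 := pv_not_stem s "B01-UL000" (by decide) h
    have h14 := pv_not_stem s "B01-UL001" (by decide) h
    have h15 := pv_not_stem s "B01-UL002" (by decide) h
    rw [hB]
    simp only [pvA, h1, h2, h3, h4, h5, h6, h7, h8, h9, h10, h11, h12, h13, h14, h15]
    simp

theorem pv_mainA (l : List String) (acc : List String) :
    l.foldl (fun locations visioId =>
      let l1 := if PySem.Str.startswith visioId "B01-UL001-IDA" || PySem.Str.startswith visioId "B01-UL002-IDA" then locations ++ ["A concourse"] else locations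
      let l2 := if PySem.Str.startswith visioId "B01-UL001-IDB" || PySem.Str.startswith visioId "B01-UL002-IDB" then l1 ++ ["B concourse"] else l1
      let l3 := if PySem.Str.startswith visioId "B01-UL001-IDC" || PySem.Str.startswith visioId "B01-UL002-IDC" then l2 ++ ["C concourse"] else l2
      let l4 := if PySem.Str.startswith visioId "B01-UL001-IDD" || PySem.Str.startswith visioId "B01-UL002-IDD" then l3 ++ ["D concourse"] else l3
      let l5 := if PySem.Str.startswith visioId "B01-UL001-IDE" || PySem.Str.startswith visioId "B01-UL002-IDE" then l4 ++ ["E concourse"] else l4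
      let l6 := if PySem.Str.startswith visioId "B01-UL001-IDL" || PySem.Str.startswith visioId "B01-UL002-IDL" then l5 ++ ["Landside"] else l5
      let l7 := if PySem.Str.startswith visioId "B01-UL000" then l6 ++ ["Ground Floor"] else l6
      let l8 := if PySem.Str.startswith visioId "B01-UL001" then l7 ++ ["1st Floor"] else l7
      let l9 := if PySem.Str.startswith visioId "B01-UL002" then l8 ++ ["2nd Floor"] else l8
      l9) acc
    = acc ++ l.flatMap pvA := by
  induction l generalizing acc with
  | nil => simp
  | cons v vs ih =>
    rw [List.foldl_cons, ih, pvA_body acc v, List.flatMap_cons, List.append_assoc]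

theorem pv_mainB (l : List String) (acc : List String) :
    l.foldl (fun locations s =>
      if ¬ PySem.Str.startswith s "B01-UL00" ∨ PySem.Str.len s ≤ 8 then locations
      else
        match PySem.Str.pyGet? s 8 with
        | none => locations
        | some d =>
          let locations :=
            if d == '1' || d == '2' then
              match pvConc.get? (PySem.Str.slice s (some 9) (some 13)) with
              | some lab => locations ++ [lab]
              | none => locations
            else locations
          match pvFloor.get? d with
          | some lab => locations ++ [lab]
          | none => locations) acc
    = acc ++ l.flatMap pvB := by
  induction l generalizing acc with
  | nil => simp
  | cons v vs ih =>
    rw [List.foldl_cons, ih, pvB_body acc v, List.flatMap_cons, List.append_assoc]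

-- ===== VERDICT (by name: the statement is the Claim_ definition above) =====
theorem get_concourse_spec : Claim_equal_get_concourse := by
  intro visioIDs _
  unfold Spec_get_concourse get_concourse get_concourse_alt
  rw [pv_mainA, pv_mainB, show pvA = pvB from funext pv_add_eq]
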